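-- pv_equiv track=rewrite | github.com/stars869/lambda-calculus-interpreter-in-python | src/interpreter.py | sep_code_blocks
-- ===== SOURCE A (Python) =====
-- def sep_code_blocks(s: str) -> list[str]:
--     lines = s.split('\n')
--     blocks = []
--     currentBlock = []
--
--     for line in lines:
--         if not line:
--             continue
--         if line.strip().startswith("--"):
--             continue
--         if not line[0].isspace():
--             blocks.append("".join(currentBlock))
--             currentBlock = [line,]
--         else:
--             currentBlock.append(line)
--
--     blocks.append("".join(currentBlock))
--
--     blocks = list(filter(lambda x: x, blocks))
--     blocks = list(filter(lambda x: not x.isspace(), blocks))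
--
--     return blocks
-- ===== SOURCE B (Python) =====
-- def sep_code_blocks(s: str) -> list[str]:
--     kept = [ln for ln in s.split('\n') if ln and not ln.strip().startswith("--")]
--
--     # group each top-level line with its span of following indented continuation lines
--     blocks = []
--     i = 0
--     while i < len(kept):
--         k = i + 1
--         while k < len(kept) and kept[k][0].isspace():
--             k += 1
--         blocks.append("".join(kept[i:k]))
--         i = k
--
--     return [b for b in blocks if not b.isspace()]
-- ===== Notes on version B (the rewrite author's own statement) =====
-- stated objective: alternative
-- what changed: A's single running-buffer loop that flushes the current block at each top-level line is replaced by two passes: first filter the meaningful lines (non-empty, not '--' comments), then recursively group each top-level line with its span of following indented continuation lines and join each group.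
import Mathlib
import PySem

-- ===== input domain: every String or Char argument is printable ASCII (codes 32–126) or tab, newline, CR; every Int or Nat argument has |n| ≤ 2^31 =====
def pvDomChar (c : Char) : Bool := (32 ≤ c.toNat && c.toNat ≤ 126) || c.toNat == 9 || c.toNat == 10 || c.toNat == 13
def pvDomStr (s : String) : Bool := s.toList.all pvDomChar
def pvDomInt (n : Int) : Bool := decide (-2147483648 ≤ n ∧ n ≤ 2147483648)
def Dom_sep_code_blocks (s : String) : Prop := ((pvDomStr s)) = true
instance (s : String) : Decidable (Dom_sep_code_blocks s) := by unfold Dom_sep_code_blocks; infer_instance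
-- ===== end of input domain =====

-- B replaces A's running-buffer-flush loop by two passes (filter kept lines, then span-based
-- grouping at top-level starts); objective: simpler/alternative decomposition, same cost.

-- `line[0].isspace()` (both Pythons evaluate it only on nonempty lines; false on "" is a harmless totalization)
def pvFirstIsSpace (l : String) : Bool :=
  match l.toList with
  | [] => false
  | c :: _ => PySem.Chars.isspace c

-- ===== PORT A =====
def sep_code_blocks (s : String) : List String :=
  let lines := (PySem.Str.split? s "\n").getD []
  let st := lines.foldl
    (fun (st : List String × List String) line =>
      if line == "" then st
      else if PySem.Str.startswith (PySem.Str.strip line) "--" then st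
      else if !(pvFirstIsSpace line) then (st.1 ++ [PySem.Str.join "" st.2], [line])
      else (st.1, st.2 ++ [line]))
    ([], [])
  let blocks := st.1 ++ [PySem.Str.join "" st.2]
  let blocks := blocks.filter (fun x => x != "")
  blocks.filter (fun x => !(PySem.Str.strIsspace x))

-- ===== PORT B =====
-- Source B's grouping loop over the remaining kept lines: head line plus its span of following
-- continuation lines (the inner `while k` scan = takeWhile/dropWhile), then the next block
def pvGroupB : List String → List String
  | [] => []
  | l :: rest =>
    PySem.Str.join "" (l :: rest.takeWhile pvFirstIsSpace) ::
      pvGroupB (rest.dropWhile pvFirstIsSpace)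
termination_by ls => ls.length
decreasing_by
  simpa using Nat.lt_succ_of_le (List.length_dropWhile_le _ _)

def sep_code_blocks_alt (s : String) : List String :=
  let kept := ((PySem.Str.split? s "\n").getD []).filter
    (fun ln => ln != "" && !(PySem.Str.startswith (PySem.Str.strip ln) "--"))
  (pvGroupB kept).filter (fun b => !(PySem.Str.strIsspace b))

-- ===== PRECONDITION & SPEC =====
def Spec_sep_code_blocks (s : String) (out : List String) : Prop := out = sep_code_blocks_alt s
instance (s : String) (out : List String) : Decidable (Spec_sep_code_blocks s out) := by unfold Spec_sep_code_blocks; infer_instance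

-- ===== CLAIM (what is proved, stated in full; the proofs are below) =====
def Claim_equal_sep_code_blocks : Prop := ∀ (s : String), Dom_sep_code_blocks s → Spec_sep_code_blocks s (sep_code_blocks s)

-- ===== LEMMAS AND PROOFS =====

-- common intermediate: A's buffer loop written as a recursion over the kept lines
def pvG (cur : List String) : List String → List String
  | [] => [PySem.Str.join "" cur]
  | l :: ls =>
    if pvFirstIsSpace l then pvG (cur ++ [l]) ls
    else PySem.Str.join "" cur :: pvG [l] ls

def pvKeptP (ln : String) : Bool := ln != "" && !(PySem.Str.startswith (PySem.Str.strip ln) "--")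

def pvStep (st : List String × List String) (line : String) : List String × List String :=
  if !(pvFirstIsSpace line) then (st.1 ++ [PySem.Str.join "" st.2], [line])
  else (st.1, st.2 ++ [line])

lemma pvFoldA (ls : List String) : ∀ (blocks cur : List String),
    (ls.foldl pvStep (blocks, cur)).1 ++ [PySem.Str.join "" (ls.foldl pvStep (blocks, cur)).2]
      = blocks ++ pvG cur ls := by
  induction ls with
  | nil => intro blocks cur; simp [pvG]
  | cons l ls ih =>
    intro blocks cur
    simp only [List.foldl_cons, pvStep, pvG]
    by_cases h : pvFirstIsSpace l
    · simp [h, ih]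
    · simp [h, ih]

lemma pvIntercalate_nil (xss : List (List Char)) :
    ([] : List Char).intercalate xss = xss.flatten := by
  induction xss with
  | nil => rfl
  | cons a tl ih =>
    cases tl with
    | nil => rfl
    | cons b l =>
      rw [List.intercalate] at ih ⊢
      rw [List.intersperse_cons₂]
      simpa using ih

lemma pvJoin_ne_empty (l : String) (cur : List String) (hl : l ≠ "") (hmem : l ∈ cur) :
    PySem.Str.join "" cur ≠ "" := by
  intro hc
  apply hl
  have h2 : (PySem.Str.join "" cur).toList = "".toList := by rw [hc]
  rw [PySem.Str.toList_join] at h2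
  simp only [PySem.Chars.join] at h2
  rw [show ("" : String).toList = [] from rfl, pvIntercalate_nil] at h2
  have h3 : l.toList = [] := by
    have := (List.flatten_eq_nil_iff.mp (by simpa using h2)) l.toList
      (List.mem_map_of_mem hmem)
    exact this
  have h4 : l.toList = ("" : String).toList := by rw [h3]; rfl
  exact String.toList_inj.mp h4

lemma pvG_ne_empty (ls : List String) : ∀ (cur : List String) (b : String),
    (∃ x ∈ cur, x ≠ "") → (∀ x ∈ ls, x ≠ "") → b ∈ pvG cur ls → b ≠ "" := by
  induction ls with
  | nil =>
    intro cur b ⟨x, hx, hxne⟩ _ hb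
    simp [pvG] at hb
    exact hb ▸ pvJoin_ne_empty x cur hxne hx
  | cons l ls ih =>
    intro cur b hcur hls hb
    simp only [pvG] at hb
    by_cases h : pvFirstIsSpace l
    · simp only [h] at hb
      exact ih (cur ++ [l]) b ⟨hcur.choose, by simp [hcur.choose_spec.1], hcur.choose_spec.2⟩
        (fun x hx => hls x (List.mem_cons_of_mem _ hx)) hb
    · simp only [h] at hb
      rcases List.mem_cons.mp hb with h1 | h2
      · exact h1 ▸ pvJoin_ne_empty hcur.choose cur hcur.choose_spec.2 hcur.choose_spec.1
      · exact ih [l] b ⟨l, by simp, hls l (by simp)⟩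
          (fun x hx => hls x (List.mem_cons_of_mem _ hx)) h2

-- span form of pvG for a nonempty buffer
lemma pvG_span (ls : List String) : ∀ (cur : List String), cur ≠ [] →
    pvG cur ls = PySem.Str.join "" (cur ++ ls.takeWhile pvFirstIsSpace) ::
      pvGroupB (ls.dropWhile pvFirstIsSpace) := by
  induction ls with
  | nil => intro cur _; simp [pvG, pvGroupB]
  | cons l ls ih =>
    intro cur hcur
    by_cases h : pvFirstIsSpace l
    · simp only [pvG, h, List.takeWhile_cons, List.dropWhile_cons]
      rw [ih (cur ++ [l]) (by simp)]
      simp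
    · simp only [pvG, h, List.takeWhile_cons, List.dropWhile_cons]
      simp only [Bool.false_eq_true, if_false]
      rw [ih [l] (by simp)]
      simp [pvGroupB]

-- filtering out the empty strings from pvG [] turns it into pvGroupB (kept lines are nonempty)
lemma pvG_filter (ls : List String) (hls : ∀ x ∈ ls, x ≠ "") :
    (pvG [] ls).filter (fun x => x != "") = pvGroupB ls := by
  cases ls with
  | nil => simp [pvG, pvGroupB]; decide
  | cons l tl =>
    have hl : l ≠ "" := hls l (by simp)
    have htl : ∀ x ∈ tl, x ≠ "" := fun x hx => hls x (List.mem_cons_of_mem _ hx)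
    have hG : pvG [l] tl = PySem.Str.join "" ([l] ++ tl.takeWhile pvFirstIsSpace) ::
        pvGroupB (tl.dropWhile pvFirstIsSpace) := pvG_span tl [l] (by simp)
    have hne : ∀ b ∈ pvG [l] tl, b ≠ "" :=
      fun b hb => pvG_ne_empty tl [l] b ⟨l, by simp, hl⟩ htl hb
    have hfilt : (pvG [l] tl).filter (fun x => x != "") = pvG [l] tl := by
      apply List.filter_eq_self.mpr
      intro b hb
      simpa using hne b hb
    by_cases h : pvFirstIsSpace l
    · simp only [pvG, h, List.nil_append]
      rw [if_pos trivial, hfilt, hG]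
      simp [pvGroupB]
    · simp only [pvG, h]
      simp only [Bool.false_eq_true, ite_false]
      have : PySem.Str.join "" [] = "" := rfl
      rw [this]
      simp only [List.filter_cons]
      simp only [bne_self_eq_false, Bool.false_eq_true, if_false]
      rw [hfilt, hG]
      simp [pvGroupB]

-- A's loop over all lines equals the loop over the kept lines
lemma pvFold_filter (lines : List String) (init : List String × List String) :
    lines.foldl
      (fun (st : List String × List String) line =>
        if line == "" then st
        else if PySem.Str.startswith (PySem.Str.strip line) "--" then st
        else if !(pvFirstIsSpace line) then (st.1 ++ [PySem.Str.join "" st.2], [line])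
        else (st.1, st.2 ++ [line]))
      init
    = (lines.filter pvKeptP).foldl pvStep init := by
  rw [List.foldl_filter]
  have hf : (fun (st : List String × List String) line =>
        if line == "" then st
        else if PySem.Str.startswith (PySem.Str.strip line) "--" then st
        else if !(pvFirstIsSpace line) then (st.1 ++ [PySem.Str.join "" st.2], [line])
        else (st.1, st.2 ++ [line]))
      = (fun (st : List String × List String) line => if pvKeptP line then pvStep st line else st) := by
    funext st line
    simp only [pvKeptP, pvStep]
    by_cases h1 : line = ""
    · simp [h1]
    · by_cases h2 : PySem.Chars.startswith (PySem.Chars.strip line.toList) ['-', '-']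
      · simp [h1, h2]
      · simp [h1, h2]
  rw [hf]

-- ===== VERDICT (by name: the statement is the Claim_ definition above) =====
theorem sep_code_blocks_spec : Claim_equal_sep_code_blocks := by
  intro s _
  unfold Spec_sep_code_blocks sep_code_blocks sep_code_blocks_alt
  simp only []
  rw [pvFold_filter]
  set kept := ((PySem.Str.split? s "\n").getD []).filter pvKeptP with hkept
  have hne : ∀ x ∈ kept, x ≠ "" := by
    intro x hx
    have := List.of_mem_filter hx
    simp [pvKeptP] at this
    exact this.1
  rw [pvFoldA kept [] []]
  simp only [List.nil_append]
  rw [pvG_filter kept hne]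
  rfl
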